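-- pv_equiv track=rewrite | github.com/JH201421228/TIL | self/202502/20250206/boj_25957/1st.py | refineString
-- ===== SOURCE A (Python) =====
-- def refineString(words):
--     res = []
--     for w in words:
--         if len(w) < 4:
--             res.append(w)
--             continue
--
--         s = str(w[0])
--         temp = []
--         for ww in w[1:-1]:
--             temp.append(ord(ww))
--         temp.sort()
--         temp = [str(x).zfill(3) for x in temp]
--
--         s += str(''.join(temp))
--         s += str(w[-1])
--
--         res.append(s)
--
--     return res
-- ===== SOURCE B (Python) =====
-- PAD = [str(v).zfill(3) for v in range(128)]
--
-- def _refine(w):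
--     if len(w) < 4:
--         return w
--     counts = [0] * 128
--     for c in w[1:-1]:
--         counts[ord(c)] += 1
--     mid = ''.join(PAD[v] * counts[v] for v in range(128))
--     return w[0] + mid + w[-1]
--
-- def refineString(words):
--     return [_refine(w) for w in words]
-- ===== Notes on version B (the rewrite author's own statement) =====
-- stated objective: alternative
-- what changed: Replaces the per-word comparison sort of the middle characters' codes by a counting sort over the bounded ASCII range (a 128-entry count array) with a precomputed table of zero-padded code strings.
import Mathlib
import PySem

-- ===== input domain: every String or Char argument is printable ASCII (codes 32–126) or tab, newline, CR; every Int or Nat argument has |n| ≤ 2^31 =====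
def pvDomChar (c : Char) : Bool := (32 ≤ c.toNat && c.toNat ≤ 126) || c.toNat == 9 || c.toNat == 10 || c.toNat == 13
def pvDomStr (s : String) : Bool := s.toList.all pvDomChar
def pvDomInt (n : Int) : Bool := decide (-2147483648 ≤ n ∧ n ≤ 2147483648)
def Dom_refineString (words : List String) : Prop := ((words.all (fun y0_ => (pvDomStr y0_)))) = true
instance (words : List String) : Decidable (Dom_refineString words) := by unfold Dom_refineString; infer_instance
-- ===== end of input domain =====

-- B replaces the per-word comparison sort of the middle characters' codes by a counting
-- sort over the bounded ASCII range with a precomputed zero-padded digit table (alternative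
-- algorithm, similar cost).

-- str(x).zfill(3), as a list of chars (this expression appears literally in both Pythons)
def padOrd3 (x : Int) : List Char := PySem.Chars.zfill (PySem.Int.toChars x) 3

-- ===== PORT A =====
def refineString (words : List String) : List String :=
  words.foldl (fun res w =>
    let cs := w.toList
    if cs.length < 4 then res ++ [w]
    else
      let temp := (PySem.List.slice cs (some 1) (some (-1))).foldl
        (fun t c => t ++ [((c.toNat : Int))]) ([] : List Int)
      let temp := PySem.List.sorted temp (fun x => x) false
      let temp := temp.map padOrd3
      let s := [cs.headI] ++ PySem.Chars.join [] temp ++ [cs.getLastD ' ']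
      res ++ [String.ofList s]) []

-- ===== PORT B =====
-- PAD = [str(v).zfill(3) for v in range(128)]
def padTable : List (List Char) := (List.range 128).map (fun v : Nat => padOrd3 (v : Int))

def refineWordB (w : String) : String :=
  let cs := w.toList
  if cs.length < 4 then w
  else
    let counts := (cs.tail.dropLast).foldl
      (fun (cnt : List Nat) c => cnt.set c.toNat (cnt.getD c.toNat 0 + 1))
      (List.replicate 128 0)
    let mid := PySem.Chars.join []
      ((List.range 128).map (fun v => (List.replicate (counts.getD v 0) (padTable.getD v [])).flatten))
    String.ofList ([cs.headI] ++ mid ++ [cs.getLastD ' '])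

def refineString_alt (words : List String) : List String := words.map refineWordB

-- ===== PRECONDITION & SPEC =====
def Spec_refineString (words : List String) (out : List String) : Prop := out = refineString_alt words
instance (words : List String) (out : List String) : Decidable (Spec_refineString words out) := by unfold Spec_refineString; infer_instance

-- ===== CLAIM (what is proved, stated in full; the proofs are below) =====
def Claim_equal_refineString : Prop := ∀ (words : List String), Dom_refineString words → Spec_refineString words (refineString words)

-- ===== LEMMAS AND PROOFS =====

-- counting-sort skeleton: all occurrences of each value v < 128, in increasing v
def countOut (cnt : Nat → Nat) : List Int :=
  (List.range 128).flatMap (fun v => List.replicate (cnt v) ((v : Nat) : Int))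

-- bumping one count inserts one more copy of that value, up to permutation
lemma perm_insert (l : List Nat) (hnd : l.Nodup) (cnt : Nat → Nat) (n : Nat) (hn : n ∈ l) :
    (l.flatMap (fun v => List.replicate (cnt v + (if v = n then 1 else 0)) ((v : Int)))).Perm
      ((n : Int) :: l.flatMap (fun v => List.replicate (cnt v) ((v : Int)))) := by
  induction l with
  | nil => simp at hn
  | cons a l ih =>
    simp only [List.flatMap_cons]
    rcases List.mem_cons.mp hn with rfl | hn'
    · have hnl : n ∉ l := (List.nodup_cons.mp hnd).1
      have hrest : l.flatMap (fun v => List.replicate (cnt v + (if v = n then 1 else 0)) ((v : Int)))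
          = l.flatMap (fun v => List.replicate (cnt v) ((v : Int))) := by
        apply List.flatMap_congr
        intro v hv
        have : v ≠ n := fun h => hnl (h ▸ hv)
        simp [this]
      rw [hrest]
      simp [List.replicate_succ]
    · have hne : a ≠ n := by
        rintro rfl; exact (List.nodup_cons.mp hnd).1 hn'
      have ih' := ih (List.nodup_cons.mp hnd).2 hn'
      simp only [hne]
      exact (ih'.append_left _).trans List.perm_middle

lemma countOut_perm (ns : List Nat) (h : ∀ n ∈ ns, n < 128) :
    (countOut (fun v => ns.count v)).Perm (ns.map (fun n : Nat => (n : Int))) := by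
  induction ns with
  | nil => simp [countOut]
  | cons n ns ih =>
    have hcnt : ∀ v, (n :: ns).count v = ns.count v + (if v = n then 1 else 0) := by
      intro v; rw [List.count_cons]; congr 1; rcases eq_or_ne v n with rfl | hv
      · simp
      · simp [hv, Ne.symm hv]
    have heq : countOut (fun v => (n :: ns).count v)
        = (List.range 128).flatMap (fun v => List.replicate (ns.count v + (if v = n then 1 else 0)) ((v : Int))) := by
      unfold countOut; simp only [hcnt]
    rw [heq]
    have h1 := perm_insert (List.range 128) (List.nodup_range) (fun v => ns.count v) n
      (List.mem_range.mpr (h n (List.mem_cons_self)))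
    refine h1.trans ?_
    simpa [countOut] using (ih (fun m hm => h m (List.mem_cons_of_mem _ hm))).cons ((n : Int))

lemma countOut_pairwise (cnt : Nat → Nat) : (countOut cnt).Pairwise (fun a b : Int => a ≤ b) := by
  unfold countOut
  apply List.pairwise_flatMap.mpr
  constructor
  · intro a _; exact List.pairwise_replicate.mpr (Or.inr le_rfl)
  · refine List.pairwise_lt_range.imp_of_mem ?_
    intro a b _ _ hab x hx y hy
    rw [List.eq_of_mem_replicate hx, List.eq_of_mem_replicate hy]
    exact_mod_cast hab.le

-- the comparison sort of A equals the counting-sort output of B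
lemma sorted_eq_countOut (ns : List Nat) (h : ∀ n ∈ ns, n < 128) :
    PySem.List.sorted (ns.map (fun n : Nat => (n : Int))) (fun x => x) false
      = countOut (fun v => ns.count v) :=
  PySem.List.sorted_id_eq_of_perm_of_pairwise _ _ (countOut_perm ns h) (countOut_pairwise _)

-- B's count array: entry v holds the number of occurrences of code v
lemma counts_fold (mid : List Char) :
    ∀ (l : List Nat), l.length = 128 → (∀ c ∈ mid, c.toNat < 128) → ∀ v, v < 128 →
      (mid.foldl (fun (cnt : List Nat) c => cnt.set c.toNat (cnt.getD c.toNat 0 + 1)) l).getD v 0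
        = l.getD v 0 + (mid.map Char.toNat).count v := by
  induction mid with
  | nil => intro l _ _ v _; simp
  | cons c mid ih =>
    intro l hlen hm v hv
    rw [List.foldl_cons]
    rw [ih _ (by simp [hlen]) (fun d hd => hm d (List.mem_cons_of_mem _ hd)) v hv]
    have hc : c.toNat < l.length := by rw [hlen]; exact hm c List.mem_cons_self
    have hset : (l.set c.toNat (l.getD c.toNat 0 + 1)).getD v 0
        = l.getD v 0 + (if c.toNat = v then 1 else 0) := by
      simp only [List.getD_eq_getElem?_getD, List.getElem?_set]
      split_ifs with h1
      · subst h1; simp [hc]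
      · simp
    rw [hset, List.map_cons, List.count_cons]
    rcases eq_or_ne v c.toNat with rfl | hne
    · simp; omega
    · simp [Ne.symm hne]

lemma join_nil_eq_flatten (ps : List (List Char)) : PySem.Chars.join [] ps = ps.flatten := by
  induction ps with
  | nil => simp [PySem.Chars.join_nil]
  | cons a ps ih => cases ps with
    | nil => simp [PySem.Chars.join_singleton]
    | cons b ps => simp [PySem.Chars.join_cons_cons, ih]

lemma flatten_flatMap_eq {α : Type} (l : List α) (g : α → List (List Char)) :
    (l.flatMap g).flatten = (l.map (fun v => (g v).flatten)).flatten := by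
  induction l with
  | nil => simp
  | cons a l ih => simp [ih]

lemma slice_one_neg_one (cs : List Char) :
    PySem.List.slice cs (some 1) (some (-1)) = cs.tail.dropLast := by
  unfold PySem.List.slice PySem.List.clampIdx
  simp
  rcases cs with _ | ⟨a, cs⟩
  · simp
  · have h : ((((a :: cs).length : Int) + -1).toNat) = cs.length := by simp
    simp [List.dropLast_eq_take]

-- the per-word transformation of A equals B's refineWordB on printable-ASCII words
lemma word_eq (w : String) (hw : pvDomStr w = true) :
    (let cs := w.toList
     if cs.length < 4 then w
     else
      let temp := (PySem.List.slice cs (some 1) (some (-1))).foldl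
        (fun t c => t ++ [((c.toNat : Int))]) ([] : List Int)
      let temp := PySem.List.sorted temp (fun x => x) false
      let temp := temp.map padOrd3
      String.ofList ([cs.headI] ++ PySem.Chars.join [] temp ++ [cs.getLastD ' '])) = refineWordB w := by
  unfold refineWordB
  set cs := w.toList with hcs
  by_cases hlen : cs.length < 4
  · simp [hlen]
  · simp only [if_neg hlen]
    have hdom : ∀ c ∈ cs, c.toNat < 128 := by
      intro c hc
      have := (List.all_eq_true.mp hw) c hc
      unfold pvDomChar at this
      simp at this
      omega
    set mid := cs.tail.dropLast with hmid
    have hmiddom : ∀ c ∈ mid, c.toNat < 128 := by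
      intro c hc
      exact hdom c (List.mem_of_mem_tail (List.mem_of_mem_dropLast hc))
    set cnt : Nat → Nat := fun v => (mid.map Char.toNat).count v with hcnt
    have hMID : PySem.Chars.join []
        ((PySem.List.sorted ((PySem.List.slice cs (some 1) (some (-1))).foldl
            (fun t c => t ++ [((c.toNat : Int))]) ([] : List Int)) (fun x => x) false).map padOrd3)
        = PySem.Chars.join []
          ((List.range 128).map (fun v =>
            (List.replicate
              ((mid.foldl (fun (c : List Nat) d => c.set d.toNat (c.getD d.toNat 0 + 1)) (List.replicate 128 0)).getD v 0)
              (padTable.getD v [])).flatten)) := by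
      rw [slice_one_neg_one, PySem.List.foldl_append_singleton_eq_map, List.nil_append]
      have hmap : mid.map (fun c => ((c.toNat : Int))) = (mid.map Char.toNat).map (fun n : Nat => (n : Int)) := by
        rw [List.map_map]; rfl
      rw [hmap, sorted_eq_countOut _ (by intro n hn; obtain ⟨c, hc, rfl⟩ := List.mem_map.mp hn; exact hmiddom c hc)]
      have hA : (countOut cnt).map padOrd3
          = (List.range 128).flatMap (fun v => List.replicate (cnt v) (padOrd3 ((v : Int)))) := by
        unfold countOut
        rw [List.map_flatMap]
        simp [List.map_replicate]
      rw [hA, join_nil_eq_flatten, flatten_flatMap_eq, ← join_nil_eq_flatten]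
      refine congrArg (PySem.Chars.join []) (List.map_congr_left ?_)
      intro v hv
      have hv' : v < 128 := List.mem_range.mp hv
      have h1 : ((mid.foldl (fun (c : List Nat) d => c.set d.toNat (c.getD d.toNat 0 + 1)) (List.replicate 128 0)).getD v 0) = cnt v := by
        rw [counts_fold mid _ (by simp) hmiddom v hv']
        rw [List.getD_eq_getElem?_getD, List.getElem?_replicate]
        simp [hv']
        rfl
      have h2 : padTable.getD v [] = padOrd3 ((v : Int)) := by
        unfold padTable
        exact PySem.List.getD_map_range _ _ _ _ hv'
      rw [h1, h2]
    rw [hMID]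

lemma fold_eq (words : List String) : ∀ res : List String, words.all pvDomStr = true →
    words.foldl (fun res w =>
      let cs := w.toList
      if cs.length < 4 then res ++ [w]
      else
        let temp := (PySem.List.slice cs (some 1) (some (-1))).foldl
          (fun t c => t ++ [((c.toNat : Int))]) ([] : List Int)
        let temp := PySem.List.sorted temp (fun x => x) false
        let temp := temp.map padOrd3
        let s := [cs.headI] ++ PySem.Chars.join [] temp ++ [cs.getLastD ' ']
        res ++ [String.ofList s]) res = res ++ words.map refineWordB := by
  induction words with
  | nil => intro res _; simp
  | cons w ws ih =>
    intro res hall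
    obtain ⟨hw, hws⟩ : pvDomStr w = true ∧ ws.all pvDomStr = true := by simpa using hall
    rw [List.foldl_cons, ih _ hws, List.map_cons]
    have hword := word_eq w hw
    by_cases h : w.toList.length < 4
    · simp only [if_pos h] at hword ⊢
      rw [← hword]
      simp
    · simp only [if_neg h] at hword ⊢
      rw [hword]
      simp

-- ===== VERDICT (by name: the statement is the Claim_ definition above) =====
theorem refineString_spec : Claim_equal_refineString := by
  intro words hdom
  unfold Spec_refineString refineString refineString_alt
  rw [fold_eq words [] hdom]
  simp
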